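-- pv_equiv track=rewrite | github.com/choidaesig/study_programmers | 프로그래머스/0/181884. n보다 커질 때까지 더하기/n보다 커질 때까지 더하기.py | solution
-- ===== SOURCE A (Python) =====
-- def solution(numbers, n):
--     answer = 0
--     while answer <= n:
--         for i in numbers:
--             if answer > n :
--                 return answer;
--             else:
--                 answer += i
--     return answer
-- ===== SOURCE B (Python) =====
-- def solution(numbers, n):
--     if n < 0:
--         return 0
--     prefix = []
--     s = 0
--     for x in numbers:
--         s += x
--         prefix.append(s)
--     m = max(prefix)
--     k = 0 if m > n else (n - m) // s + 1
--     base = k * s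
--     for p in prefix:
--         if base + p > n:
--             return base + p
-- ===== Notes on version B (the rewrite author's own statement) =====
-- stated objective: alternative
-- what changed: A simulates the cyclic accumulation element by element until the running sum exceeds n; B computes the one-cycle prefix sums, derives the number of full cycles in closed form by integer division, and scans a single final pass.
import Mathlib
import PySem

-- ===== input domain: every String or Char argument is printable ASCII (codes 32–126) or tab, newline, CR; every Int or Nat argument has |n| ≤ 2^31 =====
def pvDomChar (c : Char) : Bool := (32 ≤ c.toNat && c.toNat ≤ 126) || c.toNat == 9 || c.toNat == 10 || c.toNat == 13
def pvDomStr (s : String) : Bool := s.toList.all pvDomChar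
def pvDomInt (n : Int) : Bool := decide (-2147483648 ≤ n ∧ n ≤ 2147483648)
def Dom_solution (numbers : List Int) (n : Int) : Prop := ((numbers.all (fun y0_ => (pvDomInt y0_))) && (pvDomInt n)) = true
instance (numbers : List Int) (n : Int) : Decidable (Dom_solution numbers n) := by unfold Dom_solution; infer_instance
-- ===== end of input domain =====

-- B replaces A's element-by-element cyclic accumulation by a closed-form count of full
-- cycles (integer division) plus one scan of the one-cycle prefix sums (alternative algorithm).

-- ===== PORT A =====
-- the inner 'for i in numbers' loop: .inl = early 'return answer', .inr = pass finished
def innerA (n : Int) : Int → List Int → Sum Int Int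
  | a, [] => Sum.inr a
  | a, i :: rest => if a > n then Sum.inl a else innerA n (a + i) rest

-- the outer 'while answer <= n' loop; fuel only guards totality (A diverges outside Pre_;
-- within Dom ∧ Pre_ the loop runs fewer than 2^33 passes, proved below)
def outerA (n : Int) (numbers : List Int) : Nat → Int → Int
  | 0, a => a
  | f+1, a =>
    if a ≤ n then
      match innerA n a numbers with
      | Sum.inl r => r
      | Sum.inr a' => outerA n numbers f a'
    else a

def solution (numbers : List Int) (n : Int) : Int :=
  outerA n numbers 8589934592 0

-- ===== PORT B =====
-- prefix sums of xs starting from accumulator a (Source B's 's += x; prefix.append(s)' loop)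
def pfx (a : Int) : List Int → List Int
  | [] => []
  | x :: r => (a + x) :: pfx (a + x) r

-- Source B's 'k = 0 if m > n else (n - m) // s + 1' line
def cyclesB (m n s : Int) : Int := if m > n then 0 else PySem.Int.floordiv (n - m) s + 1

def solution_alt (numbers : List Int) (n : Int) : Int :=
  if n < 0 then 0
  else
    match PySem.List.max? (pfx 0 numbers) (fun p => p) with
    | none => 0  -- Python's max([]) raises ValueError here; outside Pre_
    | some m =>
      match (pfx 0 numbers).find? (fun p => decide (n < cyclesB m n numbers.sum * numbers.sum + p)) with
      | some p => cyclesB m n numbers.sum * numbers.sum + p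
      | none => 0  -- Python falls through (returns None); unreachable inside Pre_

-- ===== PRECONDITION & SPEC =====
-- Pre_ excludes exactly the inputs on which A's while-loop never terminates (so A returns
-- no value): n ≥ 0 with empty numbers, or n ≥ 0 with cycle sum ≤ 0 and no one-cycle
-- prefix sum exceeding n.
def Pre_solution (numbers : List Int) (n : Int) : Prop :=
  n < 0 ∨ (numbers ≠ [] ∧ (0 < numbers.sum ∨ ∃ i < numbers.length, n < (numbers.take (i + 1)).sum))
instance (numbers : List Int) (n : Int) : Decidable (Pre_solution numbers n) := by
  unfold Pre_solution; infer_instance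

def pvWitness_solution : List Int × Int := ([1, 2], 10)

def Spec_solution (numbers : List Int) (n : Int) (out : Int) : Prop := out = solution_alt numbers n
instance (numbers : List Int) (n : Int) (out : Int) : Decidable (Spec_solution numbers n out) := by unfold Spec_solution; infer_instance

-- ===== CLAIM (what is proved, stated in full; the proofs are below) =====
def Claim_equal_solution : Prop := ∀ (numbers : List Int) (n : Int), Dom_solution numbers n → Pre_solution numbers n → Spec_solution numbers n (solution numbers n)

-- ===== LEMMAS AND PROOFS =====

theorem pfx_ne_nil (a : Int) (xs : List Int) (h : xs ≠ []) : pfx a xs ≠ [] := by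
  cases xs with
  | nil => exact absurd rfl h
  | cons x r => simp [pfx]

theorem pfx_add (xs : List Int) : ∀ (a b : Int), pfx (a + b) xs = (pfx b xs).map (a + ·) := by
  induction xs with
  | nil => intro a b; simp [pfx]
  | cons x r ih =>
    intro a b
    simp only [pfx, List.map_cons]
    rw [show a + b + x = a + (b + x) by ring, ih a (b + x)]

theorem pfx_split (xs : List Int) (h : xs ≠ []) :
    ∀ a, pfx a xs = (pfx a xs).dropLast ++ [a + xs.sum] := by
  induction xs with
  | nil => exact absurd rfl h
  | cons x r ih =>
    intro a
    cases r with
    | nil => simp [pfx]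
    | cons y r' =>
      have hne : (y :: r') ≠ ([] : List Int) := by simp
      have hp : pfx (a + x) (y :: r') ≠ [] := pfx_ne_nil _ _ hne
      simp only [pfx] at *
      rw [List.dropLast_cons_of_ne_nil hp]
      have hih := ih hne (a + x)
      rw [List.cons_append,
        show a + (x :: y :: r').sum = a + x + (y :: r').sum by rw [List.sum_cons]; ring]
      exact congrArg (List.cons (a + x)) hih

theorem sum_mem_pfx (xs : List Int) (h : xs ≠ []) : xs.sum ∈ pfx 0 xs := by
  have := pfx_split xs h 0
  rw [this]
  simp

theorem head_mem_pfx (x : Int) (r : List Int) : x ∈ pfx 0 (x :: r) := by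
  simp [pfx]

theorem inner_char (n : Int) (xs : List Int) : ∀ a, a ≤ n →
    innerA n a xs =
      match ((pfx a xs).dropLast).find? (fun p => decide (n < p)) with
      | some p => Sum.inl p
      | none => Sum.inr (a + xs.sum) := by
  induction xs with
  | nil => intro a ha; simp [innerA, pfx]
  | cons x r ih =>
    intro a ha
    simp only [innerA, pfx]
    rw [if_neg (by omega)]
    cases r with
    | nil => simp [innerA, pfx]
    | cons y r' =>
      have hp : pfx (a + x) (y :: r') ≠ [] := pfx_ne_nil _ _ (by simp)
      rw [List.dropLast_cons_of_ne_nil hp, List.find?_cons]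
      by_cases hx : n < a + x
      · have hd : (decide (n < a + x)) = true := by simpa using hx
        simp only [hd]
        simp only [innerA]
        rw [if_pos (by omega : a + x > n)]
      · have hd : (decide (n < a + x)) = false := by simpa using hx
        simp only [hd]
        rw [show a + (x :: y :: r').sum = (a + x) + (y :: r').sum by rw [List.sum_cons]; ring]
        exact ih (a + x) (by omega)

theorem step_lemma (n : Int) (xs : List Int) (hne : xs ≠ []) (f : Nat) (a : Int) (ha : a ≤ n) :
    outerA n xs (f + 2) a =
      match (pfx a xs).find? (fun p => decide (n < p)) with
      | some p => p
      | none => outerA n xs (f + 1) (a + xs.sum) := by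
  have hsplit := pfx_split xs hne a
  conv_lhs => rw [show f + 2 = (f + 1) + 1 from rfl]
  simp only [outerA]
  rw [if_pos ha, inner_char n xs a ha]
  conv_rhs => rw [hsplit]
  rw [List.find?_append]
  cases hd : ((pfx a xs).dropLast).find? (fun p => decide (n < p)) with
  | some p => simp
  | none =>
    simp only [Option.none_or]
    by_cases hlast : n < a + xs.sum
    · have hd2 : (decide (n < a + xs.sum)) = true := by simpa using hlast
      rw [List.find?_cons]
      simp only [hd2]
      rw [if_neg (by omega)]
    · have hd2 : (decide (n < a + xs.sum)) = false := by simpa using hlast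
      rw [List.find?_cons]
      simp only [hd2]
      simp

theorem run_lemma (n : Int) (xs : List Int) (hne : xs ≠ []) :
    ∀ (k : Nat), ∀ (g : Nat) (a : Int), a ≤ n →
    (∀ j : Nat, j < k → ∀ p ∈ pfx 0 xs, a + (j : Int) * xs.sum + p ≤ n) →
    (∃ p ∈ pfx 0 xs, n < a + (k : Int) * xs.sum + p) →
    outerA n xs (k + 2 + g) a =
      ((pfx (a + (k : Int) * xs.sum) xs).find? (fun p => decide (n < p))).getD 0 := by
  intro k
  induction k with
  | zero =>
    intro g a ha hlt hex
    rw [show 0 + 2 + g = g + 2 by omega, step_lemma n xs hne g a ha]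
    simp only [Nat.cast_zero, zero_mul, add_zero] at hex ⊢
    have hmap : pfx a xs = (pfx 0 xs).map (a + ·) := by
      have h := pfx_add xs a 0
      simpa using h
    have hsome : (List.find? (fun p => decide (n < p)) (pfx a xs)).isSome = true := by
      rw [List.find?_isSome]
      obtain ⟨p, hp, hnp⟩ := hex
      exact ⟨a + p, by rw [hmap]; exact List.mem_map.mpr ⟨p, hp, rfl⟩, by simpa using hnp⟩
    cases hfind : List.find? (fun p => decide (n < p)) (pfx a xs) with
    | none => rw [hfind] at hsome; simp at hsome
    | some p => rfl
  | succ k ih =>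
    intro g a ha hlt hex
    rw [show (k + 1) + 2 + g = (k + 1 + g) + 2 by omega, step_lemma n xs hne (k + 1 + g) a ha]
    have hmap : pfx a xs = (pfx 0 xs).map (a + ·) := by
      have h := pfx_add xs a 0
      simpa using h
    have hzero : ∀ p ∈ pfx 0 xs, a + p ≤ n := by
      intro p hp
      have := hlt 0 (by omega) p hp
      simpa using this
    have hnone : List.find? (fun p => decide (n < p)) (pfx a xs) = none := by
      rw [List.find?_eq_none]
      intro q hq
      rw [hmap] at hq
      obtain ⟨p, hp, rfl⟩ := List.mem_map.mp hq
      have := hzero p hp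
      simp only [decide_eq_true_eq]
      omega
    rw [hnone]
    have ha' : a + xs.sum ≤ n := hzero xs.sum (sum_mem_pfx xs hne)
    have hlt' : ∀ j : Nat, j < k → ∀ p ∈ pfx 0 xs, (a + xs.sum) + (j : Int) * xs.sum + p ≤ n := by
      intro j hj p hp
      have h := hlt (j + 1) (by omega) p hp
      push_cast at h ⊢
      nlinarith [h]
    have hex' : ∃ p ∈ pfx 0 xs, n < (a + xs.sum) + (k : Int) * xs.sum + p := by
      obtain ⟨p, hp, hnp⟩ := hex
      refine ⟨p, hp, ?_⟩
      push_cast at hnp ⊢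
      nlinarith [hnp]
    have hres := ih g (a + xs.sum) ha' hlt' hex'
    have harg : a + xs.sum + (k : Int) * xs.sum = a + ((k + 1 : Nat) : Int) * xs.sum := by
      push_cast; ring
    rw [harg] at hres
    rw [show k + 1 + g + 1 = k + 2 + g by omega]
    exact hres

theorem outerA_succ (n : Int) (xs : List Int) (f : Nat) (a : Int) :
    outerA n xs (f + 1) a =
      if a ≤ n then
        match innerA n a xs with
        | Sum.inl r => r
        | Sum.inr a' => outerA n xs f a'
      else a := by
  simp only [outerA]

theorem bridge (numbers : List Int) (n : Int) (hne : numbers ≠ []) (hn : 0 ≤ n)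
    (kI : Int) (hk0 : 0 ≤ kI) (hkb : kI ≤ 8589934589)
    (hlt : ∀ j : Nat, (j : Int) < kI → ∀ p ∈ pfx 0 numbers, (j : Int) * numbers.sum + p ≤ n)
    (hex : ∃ p ∈ pfx 0 numbers, n < kI * numbers.sum + p) :
    outerA n numbers 8589934592 0 =
      match (pfx 0 numbers).find? (fun p => decide (n < kI * numbers.sum + p)) with
      | some p => kI * numbers.sum + p
      | none => 0 := by
  have hK : ((kI.toNat : Nat) : Int) = kI := Int.toNat_of_nonneg hk0
  have hKb : kI.toNat ≤ 8589934589 := by omega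
  have hlt' : ∀ j : Nat, j < kI.toNat → ∀ p ∈ pfx 0 numbers,
      (0 : Int) + (j : Int) * numbers.sum + p ≤ n := by
    intro j hj p hp
    have h := hlt j (by omega) p hp
    linarith
  have hex' : ∃ p ∈ pfx 0 numbers, n < (0 : Int) + ((kI.toNat : Nat) : Int) * numbers.sum + p := by
    obtain ⟨p, hp, hnp⟩ := hex
    exact ⟨p, hp, by rw [hK]; linarith⟩
  have hrun := run_lemma n numbers hne kI.toNat (8589934592 - (kI.toNat + 2)) 0 hn hlt' hex'
  rw [show kI.toNat + 2 + (8589934592 - (kI.toNat + 2)) = 8589934592 by omega] at hrun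
  rw [hrun]
  have hmap : pfx ((0 : Int) + ((kI.toNat : Nat) : Int) * numbers.sum) numbers
      = (pfx 0 numbers).map (fun p => kI * numbers.sum + p) := by
    have h := pfx_add numbers (kI * numbers.sum) 0
    rw [hK, zero_add]
    simpa using h
  rw [hmap, List.find?_map]
  obtain ⟨p0, hp0, hnp0⟩ := hex
  have hsome : ((pfx 0 numbers).find?
      ((fun p => decide (n < p)) ∘ (fun p => kI * numbers.sum + p))).isSome = true := by
    rw [List.find?_isSome]
    exact ⟨p0, hp0, by simpa using hnp0⟩
  cases hfind : (pfx 0 numbers).find?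
      ((fun p => decide (n < p)) ∘ (fun p => kI * numbers.sum + p)) with
  | none => rw [hfind] at hsome; simp at hsome
  | some p =>
    have hfind' : (pfx 0 numbers).find? (fun p => decide (n < kI * numbers.sum + p)) = some p := hfind
    rw [hfind']
    rfl

theorem take_sum_mem_pfx (xs : List Int) : ∀ (a : Int) (i : Nat), i < xs.length →
    a + (xs.take (i + 1)).sum ∈ pfx a xs := by
  induction xs with
  | nil => intro a i hi; simp at hi
  | cons x r ih =>
    intro a i hi
    cases i with
    | zero => simp [pfx]
    | succ i =>
      simp only [List.take_succ_cons, List.sum_cons, pfx, List.mem_cons]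
      right
      have := ih (a + x) i (by simpa using hi)
      rw [show a + (x + (r.take (i + 1)).sum) = a + x + (r.take (i + 1)).sum by ring]
      exact this

theorem solution_spec : Claim_equal_solution := by
  intro numbers n hDom hPre
  unfold Spec_solution solution solution_alt
  by_cases hn : n < 0
  · rw [if_pos hn]
    rw [show (8589934592 : Nat) = 8589934591 + 1 by norm_num, outerA_succ]
    rw [if_neg (by omega)]
  · rw [if_neg hn]
    rw [not_lt] at hn
    have hne : numbers ≠ [] := by
      rcases hPre with h | ⟨h, _⟩
      · omega
      · exact h
    cases hmax : PySem.List.max? (pfx 0 numbers) (fun p => p) with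
    | none =>
      exact absurd ((PySem.List.max?_eq_none_iff _ _).mp hmax) (pfx_ne_nil 0 numbers hne)
    | some m =>
      have hm_mem : m ∈ pfx 0 numbers := PySem.List.max?_mem hmax
      have hm_max : ∀ y ∈ pfx 0 numbers, y ≤ m := fun y hy => PySem.List.max?_isMax hmax y hy
      by_cases hmn : m > n
      · -- no full cycle needed: k = 0
        have hk : cyclesB m n numbers.sum = 0 := by unfold cyclesB; rw [if_pos hmn]
        show outerA n numbers 8589934592 0 =
          match (pfx 0 numbers).find? (fun p => decide (n < cyclesB m n numbers.sum * numbers.sum + p)) with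
          | some p => cyclesB m n numbers.sum * numbers.sum + p
          | none => 0
        rw [hk]
        exact bridge numbers n hne hn 0 le_rfl (by norm_num)
          (fun j hj => absurd hj (by omega))
          ⟨m, hm_mem, by rw [zero_mul, zero_add]; exact hmn⟩
      · -- m ≤ n: Pre_ forces a positive cycle sum; (n - m) // sum + 1 full cycles
        have hs : 0 < numbers.sum := by
          rcases hPre with h | ⟨_, h | h⟩
          · omega
          · exact h
          · obtain ⟨i, hi, hip⟩ := h
            have hp := take_sum_mem_pfx numbers 0 i hi
            rw [zero_add] at hp
            have := hm_max _ hp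
            omega
        have hk : cyclesB m n numbers.sum = PySem.Int.floordiv (n - m) numbers.sum + 1 := by
          unfold cyclesB; rw [if_neg hmn]
        show outerA n numbers 8589934592 0 =
          match (pfx 0 numbers).find? (fun p => decide (n < cyclesB m n numbers.sum * numbers.sum + p)) with
          | some p => cyclesB m n numbers.sum * numbers.sum + p
          | none => 0
        rw [hk]
        have hq0 : 0 ≤ PySem.Int.floordiv (n - m) numbers.sum :=
          (PySem.Int.le_floordiv_iff_mul_le hs).mpr (by rw [zero_mul]; omega)
        have hqub : PySem.Int.floordiv (n - m) numbers.sum ≤ n - m := by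
          have h1 : (n - m + 1) * 1 ≤ (n - m + 1) * numbers.sum :=
            mul_le_mul_of_nonneg_left (by omega) (by omega)
          have h2 : n - m < (n - m + 1) * numbers.sum := by linarith
          have h3 := (PySem.Int.floordiv_lt_iff_lt_mul (q := n - m + 1) hs).mpr h2
          omega
        -- Dom bounds keep the cycle count below the fuel
        simp only [Dom_solution, List.all_eq_true, Bool.and_eq_true, pvDomInt,
          decide_eq_true_eq] at hDom
        obtain ⟨x, r, hxr⟩ : ∃ x r, numbers = x :: r := by
          cases numbers with
          | nil => exact absurd rfl hne
          | cons a b => exact ⟨a, b, rfl⟩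
        have hxm : x ≤ m := hm_max x (by rw [hxr]; exact head_mem_pfx x r)
        have hxlb : -2147483648 ≤ x := (hDom.1 x (by rw [hxr]; simp)).1
        have hnub : n ≤ 2147483648 := hDom.2.2
        refine bridge numbers n hne hn (PySem.Int.floordiv (n - m) numbers.sum + 1)
          (by omega) (by omega) ?_ ?_
        · intro j hj p hp
          have hjq : (j : Int) ≤ PySem.Int.floordiv (n - m) numbers.sum := by omega
          have h1 := (PySem.Int.le_floordiv_iff_mul_le hs).mp hjq
          have h2 := hm_max p hp
          linarith
        · refine ⟨m, hm_mem, ?_⟩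
          have h1 := (PySem.Int.floordiv_lt_iff_lt_mul (a := n - m)
            (q := PySem.Int.floordiv (n - m) numbers.sum + 1) hs).mp (by omega)
          linarith
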